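-- pv_equiv track=rewrite | github.com/Arkadipttv/IT-Workshop-Python-lab | day4/pro6.py | move_duplicates_to_end
-- ===== SOURCE A (Python) =====
-- def move_duplicates_to_end(lst):
--     duplicates=[]
--     non_duplicates=[]
--     """
--     Move all duplicate values in a list to the end of the list.
--
--     Args:
--         lst (list): The input list.
--
--     Returns:
--         list: The modified list with duplicates at the end.
--     """
--     # Create a dictionary to store the count of each element
--     count_dict = {}
--     for num in lst:
--         if num in count_dict:
--             count_dict[num] += 1
--         else:
--             count_dict[num] = 1
--
--     # Separate the list into two lists: one with duplicates and one without
--     #non_duplicates = [num for num in lst if count_dict[num] == 1]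
--     for num in lst:
--         if count_dict[num] == 1:
--             non_duplicates.append(num)
--     #duplicates = [num for num in lst if count_dict[num] > 1]
--
--         if count_dict[num] > 1:
--             duplicates.append(num)
--
--     # Combine the two lists, with non-duplicates first
--     result = non_duplicates + duplicates
--
--     return result
-- ===== SOURCE B (Python) =====
-- def move_duplicates_to_end(lst):
--     counts = {}
--     for x in lst:
--         counts[x] = counts.get(x, 0) + 1
--     return sorted(lst, key=lambda x: counts[x] > 1)
-- ===== Notes on version B (the rewrite author's own statement) =====
-- stated objective: idiomatic
-- what changed: Replaces A's two-accumulator partition-and-concatenate loop with a single stable sort keyed on 'count > 1', relying on sort stability to keep unique elements first in original order.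
import Mathlib
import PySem

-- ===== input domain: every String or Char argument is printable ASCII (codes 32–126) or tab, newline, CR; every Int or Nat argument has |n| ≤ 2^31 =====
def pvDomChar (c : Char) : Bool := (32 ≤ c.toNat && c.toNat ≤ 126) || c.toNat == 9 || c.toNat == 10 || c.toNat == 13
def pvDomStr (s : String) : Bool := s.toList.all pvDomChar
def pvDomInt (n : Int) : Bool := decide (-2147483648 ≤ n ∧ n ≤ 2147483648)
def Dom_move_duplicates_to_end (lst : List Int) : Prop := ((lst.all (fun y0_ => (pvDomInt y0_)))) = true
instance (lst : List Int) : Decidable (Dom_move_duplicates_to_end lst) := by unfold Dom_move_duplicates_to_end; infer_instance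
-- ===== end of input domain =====

-- B replaces A's two-accumulator partition loop by one stable sort keyed on 'count > 1' (idiomatic, not faster).

-- ===== PORT A =====
-- one iteration of A's counting loop: 'if num in count_dict: +=1 else: =1'
def countStepA (d : PySem.Dict Int Int) (num : Int) : PySem.Dict Int Int :=
  match d.get? num with
  | some c => d.insert num (c + 1)
  | none => d.insert num 1

-- one iteration of A's second loop (both ifs in the same iteration, appending to the pair
-- non_duplicates/duplicates); count_dict[num] is always present, so getD 0 is exact here
def moveStepA (cd : PySem.Dict Int Int) (acc : List Int × List Int) (num : Int) :
    List Int × List Int :=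
  let acc1 := if cd.getD num 0 == 1 then (acc.1 ++ [num], acc.2) else acc
  if cd.getD num 0 > 1 then (acc1.1, acc1.2 ++ [num]) else acc1

def move_duplicates_to_end (lst : List Int) : List Int :=
  let count_dict := lst.foldl countStepA PySem.Dict.empty
  let p := lst.foldl (moveStepA count_dict) ([], [])
  p.1 ++ p.2

-- ===== PORT B =====
-- one iteration of B's counting loop: 'counts[x] = counts.get(x, 0) + 1'
def countStepB (d : PySem.Dict Int Int) (x : Int) : PySem.Dict Int Int :=
  d.insert x (d.getD x 0 + 1)

def move_duplicates_to_end_alt (lst : List Int) : List Int :=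
  let counts := lst.foldl countStepB PySem.Dict.empty
  PySem.List.sorted lst (fun x => decide (counts.getD x 0 > 1))

-- ===== PRECONDITION & SPEC =====
def Spec_move_duplicates_to_end (lst : List Int) (out : List Int) : Prop := out = move_duplicates_to_end_alt lst
instance (lst : List Int) (out : List Int) : Decidable (Spec_move_duplicates_to_end lst out) := by unfold Spec_move_duplicates_to_end; infer_instance

-- ===== CLAIM (what is proved, stated in full; the proofs are below) =====
def Claim_equal_move_duplicates_to_end : Prop := ∀ (lst : List Int), Dom_move_duplicates_to_end lst → Spec_move_duplicates_to_end lst (move_duplicates_to_end lst)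

-- ===== LEMMAS AND PROOFS =====

-- A's dict-building step is exactly 'insert num (getD num 0 + 1)'
theorem countStepA_eq (d : PySem.Dict Int Int) (num : Int) :
    countStepA d num = d.insert num (d.getD num 0 + 1) := by
  unfold countStepA
  cases h : d.get? num with
  | none => rw [PySem.Dict.getD_of_get?_eq_none _ _ h]; norm_num
  | some c => rw [PySem.Dict.getD_of_get?_eq_some _ _ h]

theorem count_dict_getD (lst : List Int) (v : Int) :
    (lst.foldl countStepA PySem.Dict.empty).getD v 0 = lst.count v := by
  rw [PySem.List.foldl_congr_mem lst countStepA (fun d x => d.insert x (d.getD x 0 + 1))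
      PySem.Dict.empty (fun acc x _ => countStepA_eq acc x)]
  rw [PySem.Dict.getD_foldl_insert_add_one]
  simp [PySem.Dict.getD_empty]

-- A's partition loop appends the ==1 elements to the first list and the >1 elements to the second
theorem partition_loop (cd : PySem.Dict Int Int) :
    ∀ (l : List Int) (nd dup : List Int),
    l.foldl (moveStepA cd) (nd, dup)
    = (nd ++ l.filter (fun x => cd.getD x 0 == 1), dup ++ l.filter (fun x => cd.getD x 0 > 1)) := by
  intro l
  induction l with
  | nil => simp
  | cons x xs ih =>
    intro nd dup
    simp only [List.foldl_cons, List.filter_cons]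
    by_cases h1 : cd.getD x 0 == 1 <;> by_cases h2 : cd.getD x 0 > 1 <;>
      simp [moveStepA, h1, h2, ih, List.append_assoc]

-- insertBy walks past a prefix it is not inserted before
theorem insertBy_skip (before : Int → Int → Bool) (x : Int) :
    ∀ (F T : List Int), (∀ y ∈ F, before x y = false) →
    PySem.List.insertBy before x (F ++ T) = F ++ PySem.List.insertBy before x T := by
  intro F
  induction F with
  | nil => intro T _; simp
  | cons f fs ih =>
    intro T h
    have hf : before x f = false := h f (by simp)
    simp only [List.cons_append, PySem.List.insertBy, hf]
    simp [ih T (fun y hy => h y (by simp [hy]))]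

-- the stable insertion sort with a Bool key keeps building (false-keyed prefix) ++ (true-keyed suffix)
theorem foldl_insertBy_partition (key : Int → Bool) :
    ∀ (l F T : List Int), (∀ y ∈ F, key y = false) → (∀ y ∈ T, key y = true) →
    l.foldl (fun acc x => PySem.List.insertBy (fun a b => decide (key a < key b)) x acc) (F ++ T)
    = (F ++ l.filter (fun x => !key x)) ++ (T ++ l.filter key) := by
  intro l
  induction l with
  | nil => intro F T _ _; simp
  | cons x xs ih =>
    intro F T hF hT
    simp only [List.foldl_cons, List.filter_cons]
    by_cases hx : key x = true
    · have hnb : ∀ y ∈ F ++ T, (fun a b => decide (key a < key b)) x y = false := by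
        intro y _
        simp only [hx]
        cases key y <;> decide
      rw [PySem.List.insertBy_of_forall_not_before _ _ _ hnb]
      have hassoc : (F ++ T) ++ [x] = F ++ (T ++ [x]) := by simp
      rw [hassoc, ih F (T ++ [x]) hF (by intro y hy; rcases List.mem_append.mp hy with h | h
                                         · exact hT y h
                                         · simp at h; simp [h, hx])]
      simp [hx, List.append_assoc]
    · have hxf : key x = false := by revert hx; cases key x <;> simp
      have hskip : ∀ y ∈ F, (fun a b => decide (key a < key b)) x y = false := by
        intro y hy
        simp only [hF y hy, hxf]
        decide
      rw [insertBy_skip _ _ F T hskip]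
      have hT' : PySem.List.insertBy (fun a b => decide (key a < key b)) x T = x :: T := by
        cases T with
        | nil => simp [PySem.List.insertBy]
        | cons t ts =>
          have ht : key t = true := hT t (by simp)
          simp [PySem.List.insertBy, ht, hxf]
      rw [hT']
      have hassoc : F ++ x :: T = (F ++ [x]) ++ T := by simp
      rw [hassoc, ih (F ++ [x]) T (by intro y hy; rcases List.mem_append.mp hy with h | h
                                      · exact hF y h
                                      · simp at h; simp [h, hxf]) hT]
      simp [hxf, List.append_assoc]

-- stable sort with a Bool key = false-keyed elements then true-keyed elements, each in order
theorem sorted_bool_key (lst : List Int) (key : Int → Bool) :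
    PySem.List.sorted lst key = lst.filter (fun x => !key x) ++ lst.filter key := by
  rw [PySem.List.sorted_eq_foldl_insertBy]
  have := foldl_insertBy_partition key lst [] [] (by simp) (by simp)
  simpa using this

-- B's counts dict looks up to the number of occurrences
theorem counts_getD (lst : List Int) (v : Int) :
    (lst.foldl countStepB PySem.Dict.empty).getD v 0 = (lst.count v : Int) := by
  have h := PySem.Dict.getD_foldl_insert_add_one lst (PySem.Dict.empty (κ := Int) (ν := Int)) v
  simp [PySem.Dict.getD_empty] at h
  exact h

-- ===== VERDICT (by name: the statement is the Claim_ definition above) =====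
theorem move_duplicates_to_end_spec : Claim_equal_move_duplicates_to_end := by
  intro lst _
  show _ = _
  simp only [move_duplicates_to_end, move_duplicates_to_end_alt]
  rw [partition_loop]
  rw [sorted_bool_key]
  simp only [List.nil_append]
  congr 1
  · apply List.filter_congr
    intro x hx
    simp only [counts_getD, count_dict_getD]
    have hc : 0 < lst.count x := List.count_pos_iff.mpr hx
    by_cases h : ((lst.count x : Int)) > 1
    · simp [h]; omega
    · simp [h]; omega
  · apply List.filter_congr
    intro x _
    simp only [counts_getD, count_dict_getD]
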